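-- pv_equiv track=rewrite | github.com/adfio1234/Algorithms | SWEA/D3/24420. 집합 비교/집합 비교.py | identifySet
-- ===== SOURCE A (Python) =====
-- def identifySet(firstSet,secondSet):
--     output="?"
--     if firstSet==secondSet:
--         output="="
--     elif len(firstSet)>len(secondSet):
--         for i in secondSet:
--             if i not in firstSet:
--                 return "?"
--         output=">"
--     elif len(firstSet)<len(secondSet):
--         for i in firstSet:
--             if i not in secondSet:
--                 return "?"
--         output="<"
--
--     return output
-- ===== SOURCE B (Python) =====
-- def identifySet(firstSet, secondSet):
--     # sort the deduplicated elements and decide subset by a two-pointer merge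
--     if firstSet == secondSet:
--         return "="
--     if len(firstSet) == len(secondSet):
--         return "?"
--     if len(firstSet) > len(secondSet):
--         small, big, mark = secondSet, firstSet, ">"
--     else:
--         small, big, mark = firstSet, secondSet, "<"
--     s = sorted(set(small))
--     g = sorted(set(big))
--     i = j = 0
--     while i < len(s):
--         if j >= len(g):
--             return "?"
--         if g[j] < s[i]:
--             j += 1
--         elif g[j] == s[i]:
--             i += 1
--             j += 1
--         else:
--             return "?"
--     return mark
-- ===== Notes on version B (the rewrite author's own statement) =====
-- stated objective: alternative
-- what changed: B replaces A's nested membership scans with sort-the-deduplicated-elements plus a two-pointer merge subset test on the two sorted lists.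
import Mathlib
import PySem

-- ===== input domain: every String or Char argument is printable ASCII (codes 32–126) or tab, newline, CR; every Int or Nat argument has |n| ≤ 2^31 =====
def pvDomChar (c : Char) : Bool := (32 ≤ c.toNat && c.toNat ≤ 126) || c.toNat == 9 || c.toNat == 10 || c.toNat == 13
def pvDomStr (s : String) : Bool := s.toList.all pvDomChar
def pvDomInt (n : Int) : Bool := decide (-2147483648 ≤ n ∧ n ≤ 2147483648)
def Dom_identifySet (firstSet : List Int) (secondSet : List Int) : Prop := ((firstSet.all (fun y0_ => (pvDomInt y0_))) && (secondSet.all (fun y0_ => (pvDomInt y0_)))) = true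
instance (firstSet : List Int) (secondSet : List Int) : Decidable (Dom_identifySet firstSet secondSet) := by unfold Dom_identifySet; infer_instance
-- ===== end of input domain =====

-- B replaces A's nested membership scans with sorted-deduplicated lists and a
-- two-pointer merge subset test. Objective: alternative.

-- ===== PORT A =====
-- the 'for i in …: if i not in …: return "?"' loop ending with output = mark
def identifySetLoop (container : List Int) (mark : String) : List Int → String
  | [] => mark
  | i :: rest => if container.contains i then identifySetLoop container mark rest else "?"

def identifySet (firstSet : List Int) (secondSet : List Int) : String :=
  if firstSet = secondSet then "="
  else if secondSet.length < firstSet.length then identifySetLoop firstSet ">" secondSet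
  else if firstSet.length < secondSet.length then identifySetLoop secondSet "<" firstSet
  else "?"

-- ===== PORT B =====
-- the two-pointer while loop over the sorted deduplicated lists s (small) and g (big)
def twoPtr (mark : String) : List Int → List Int → String
  | [], _ => mark
  | _ :: _, [] => "?"
  | a :: s, b :: g =>
      if b < a then twoPtr mark (a :: s) g
      else if b = a then twoPtr mark s g
      else "?"

def identifySet_alt (firstSet : List Int) (secondSet : List Int) : String :=
  if firstSet = secondSet then "="
  else if firstSet.length = secondSet.length then "?"
  else
    let (small, big, mark) :=
      if secondSet.length < firstSet.length then (secondSet, firstSet, ">")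
      else (firstSet, secondSet, "<")
    let s := PySem.List.sorted (PySem.Set.ofList small) (fun x => x) false
    let g := PySem.List.sorted (PySem.Set.ofList big) (fun x => x) false
    twoPtr mark s g

-- ===== PRECONDITION & SPEC =====
def Spec_identifySet (firstSet : List Int) (secondSet : List Int) (out : String) : Prop := out = identifySet_alt firstSet secondSet
instance (firstSet : List Int) (secondSet : List Int) (out : String) : Decidable (Spec_identifySet firstSet secondSet out) := by unfold Spec_identifySet; infer_instance

-- ===== CLAIM (what is proved, stated in full; the proofs are below) =====
def Claim_equal_identifySet : Prop := ∀ (firstSet : List Int) (secondSet : List Int), Dom_identifySet firstSet secondSet → Spec_identifySet firstSet secondSet (identifySet firstSet secondSet)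

-- ===== LEMMAS AND PROOFS =====
-- A's loop returns its mark exactly when every element of l is in the container.
theorem identifySetLoop_eq (container : List Int) (mark : String) (l : List Int) :
    identifySetLoop container mark l =
      if ∀ x ∈ l, x ∈ container then mark else "?" := by
  induction l with
  | nil => simp [identifySetLoop]
  | cons i rest ih =>
    simp only [identifySetLoop]
    by_cases h : i ∈ container
    · simp [h, ih]
    · simp [h]

-- On strictly increasing lists, the two-pointer merge decides the subset relation.
theorem twoPtr_eq (mark : String) (s g : List Int)
    (hs : s.Pairwise (· < ·)) (hg : g.Pairwise (· < ·)) :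
    twoPtr mark s g = if ∀ x ∈ s, x ∈ g then mark else "?" := by
  induction g generalizing s with
  | nil =>
    cases s with
    | nil => simp [twoPtr]
    | cons a s =>
      have hF : ¬ ∀ x ∈ a :: s, x ∈ ([] : List Int) :=
        fun h => (List.not_mem_nil) (h a List.mem_cons_self)
      rw [if_neg hF]
      rfl
  | cons b g ihg =>
    cases s with
    | nil => simp [twoPtr]
    | cons a s =>
      have hs' := (List.pairwise_cons.mp hs).2
      have hsa := (List.pairwise_cons.mp hs).1
      have hg' := (List.pairwise_cons.mp hg).2
      have hgb := (List.pairwise_cons.mp hg).1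
      by_cases hba : b < a
      · have key : (∀ x ∈ a :: s, x ∈ b :: g) ↔ (∀ x ∈ a :: s, x ∈ g) := by
          constructor
          · intro h x hx
            rcases List.mem_cons.mp (h x hx) with h1 | h1
            · exfalso
              rcases List.mem_cons.mp hx with rfl | hx'
              · subst h1; omega
              · have := hsa x hx'; omega
            · exact h1
          · intro h x hx; exact List.mem_cons_of_mem _ (h x hx)
        show (if b < a then twoPtr mark (a :: s) g else _) = _
        rw [if_pos hba, ihg (a :: s) hs hg']
        simp only [key]
      · by_cases hbe : b = a
        · subst hbe
          have key : (∀ x ∈ b :: s, x ∈ b :: g) ↔ (∀ x ∈ s, x ∈ g) := by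
            constructor
            · intro h x hx
              rcases List.mem_cons.mp (h x (List.mem_cons_of_mem _ hx)) with h1 | h1
              · exfalso; have := hsa x hx; subst h1; omega
              · exact h1
            · intro h x hx
              rcases List.mem_cons.mp hx with rfl | hx'
              · exact List.mem_cons_self
              · exact List.mem_cons_of_mem _ (h x hx')
          show (if b < b then _ else if b = b then twoPtr mark s g else _) = _
          rw [if_neg hba, if_pos rfl, ihg s hs' hg']
          simp only [key]
        · have hab : a < b := by
            rcases lt_trichotomy a b with h | h | h
            · exact h
            · exact absurd h.symm hbe
            · exact absurd h hba
          have hF : ¬ (∀ x ∈ a :: s, x ∈ b :: g) := by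
            intro h
            rcases List.mem_cons.mp (h a List.mem_cons_self) with h1 | h1
            · subst h1; omega
            · have := hgb a h1; omega
          show (if b < a then _ else if b = a then _ else "?") = _
          rw [if_neg hba, if_neg hbe, if_neg hF]

-- B's subset test over sorted(set(small)) / sorted(set(big)) is A's membership condition.
theorem twoPtr_sorted_eq (mark : String) (small big : List Int) :
    twoPtr mark (PySem.List.sorted (PySem.Set.ofList small) (fun x => x) false)
                (PySem.List.sorted (PySem.Set.ofList big) (fun x => x) false) =
      if ∀ x ∈ small, x ∈ big then mark else "?" := by
  rw [twoPtr_eq mark _ _ (PySem.List.sorted_ofList_pairwise_lt small)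
        (PySem.List.sorted_ofList_pairwise_lt big)]
  have key : (∀ x ∈ PySem.List.sorted (PySem.Set.ofList small) (fun x => x) false,
            x ∈ PySem.List.sorted (PySem.Set.ofList big) (fun x => x) false) ↔
         (∀ x ∈ small, x ∈ big) := by
    simp [PySem.List.mem_sorted, PySem.Set.mem_ofList]
  simp only [key]

-- ===== VERDICT (by name: the statement is the Claim_ definition above) =====
theorem identifySet_spec : Claim_equal_identifySet := by
  intro firstSet secondSet _
  unfold Spec_identifySet identifySet identifySet_alt
  by_cases he : firstSet = secondSet
  · simp [he]
  · by_cases h1 : secondSet.length < firstSet.length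
    · have h2 : ¬ firstSet.length = secondSet.length := by omega
      simp [he, h1, h2, identifySetLoop_eq, twoPtr_sorted_eq]
    · by_cases h2 : firstSet.length < secondSet.length
      · have h3 : ¬ firstSet.length = secondSet.length := by omega
        simp [he, h1, h2, h3, identifySetLoop_eq, twoPtr_sorted_eq]
      · have h3 : firstSet.length = secondSet.length := by omega
        simp [he, h3]
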